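-- pv_equiv track=rewrite | github.com/ouelletmathieu/BMS | boolean/adv_descriptor_util.py | get_minimum_node_set_all
-- ===== SOURCE A (Python) =====
-- from itertools import combinations, chain
--
-- def get_minimum_node_set_all(cycle_list, node_list):
--
--     s = node_list
--     min_sub = [node_list]
--
--     for sub in chain.from_iterable(combinations(s, r) for r in range(len(s)+1)):
--
--         sub = list(sub)
--
--         if len(sub)>0:
--
--             one_per_cycle = True
--
--             for cycle in cycle_list:
--                 this_cycle_ok = False
--                 for node in sub:
--                     if node in cycle:
--                         this_cycle_ok=True
--                         break
--                 if not this_cycle_ok: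
--                     one_per_cycle = False
--                     break
--
--             if one_per_cycle:
--                 if len(sub) < len(min_sub[0]):
--                     min_sub = [list(sub)]
--                 elif len(sub) == len(min_sub[0]):
--                     min_sub.append(list(sub))
--
--     return min_sub
-- ===== SOURCE B (Python) =====
-- from itertools import combinations
--
-- def get_minimum_node_set_all(cycle_list, node_list):
--     # Enumerate subsets by increasing size and stop at the first size that
--     # yields hitting sets; set-based membership for the cycle test.
--     node_set = set(node_list)
--     cycle_sets = [set(c) for c in cycle_list]
--     if any(not (cs & node_set) for cs in cycle_sets):
--         # some cycle contains no node at all: no subset can hit every cycle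
--         return [node_list]
--     for r in range(1, len(node_list) + 1):
--         found = [list(sub) for sub in combinations(node_list, r)
--                  if all(any(x in cs for x in sub) for cs in cycle_sets)]
--         if found:
--             return found
--     return [node_list]
-- ===== Notes on version B (the rewrite author's own statement) =====
-- stated objective: faster
-- what changed: B first rejects infeasible inputs (a cycle disjoint from the node set) in O(C), then enumerates subsets by increasing size with set-based membership and returns at the first size yielding hitting sets, instead of A's fold over all 2^n subsets with a running minimum list.
-- intended difference: On inputs where node_list is nonempty, hits every cycle, but no nonempty proper sub-list does, A returns [node_list, node_list] (its leftover initial state plus an appended copy) while B returns [node_list] once, the intended list of minimal hitting sets. — e.g. on get_minimum_node_set_all([[5]], [5]): A returns [[5], [5]], B returns [[5]]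
import Mathlib
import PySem

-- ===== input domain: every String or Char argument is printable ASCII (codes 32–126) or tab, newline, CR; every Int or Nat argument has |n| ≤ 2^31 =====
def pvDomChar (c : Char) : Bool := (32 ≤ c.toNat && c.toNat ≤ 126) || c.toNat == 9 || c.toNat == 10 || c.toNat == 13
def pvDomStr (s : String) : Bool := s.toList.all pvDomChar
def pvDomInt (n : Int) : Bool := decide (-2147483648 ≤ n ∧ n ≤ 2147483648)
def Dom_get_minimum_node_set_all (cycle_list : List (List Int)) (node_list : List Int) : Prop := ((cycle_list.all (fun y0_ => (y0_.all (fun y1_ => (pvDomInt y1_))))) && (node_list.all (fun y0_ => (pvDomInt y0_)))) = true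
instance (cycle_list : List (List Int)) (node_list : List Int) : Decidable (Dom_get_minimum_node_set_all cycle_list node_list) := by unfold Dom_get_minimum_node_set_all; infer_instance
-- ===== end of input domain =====

-- B enumerates subsets by increasing size and stops at the first size yielding hitting
-- sets (set-based cycle membership) instead of A's scan over all 2^n subsets; on the
-- corner where the full node set is the unique minimal hitting set, A returns it twice
-- (leftover initial state plus an appended copy) while B returns it once (D_ below).

-- ===== PORT A =====
-- itertools.combinations(s, r) in Python's emission order (lexicographic by index);
-- shared by both ports because both Python versions call itertools.combinations.
def pvCombinations : List Int → Nat → List (List Int)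
  | _, 0 => [[]]
  | [], _ + 1 => []
  | x :: xs, r + 1 => ((pvCombinations xs r).map (fun t => x :: t)) ++ pvCombinations xs (r + 1)

-- A's two inner loops with break: "for each cycle, some node of sub is in it" (all/any).
def aHits (cycle_list : List (List Int)) (sub : List Int) : Bool :=
  cycle_list.all (fun cycle => sub.any (fun node => decide (node ∈ cycle)))

-- A's loop body; min_sub is invariantly nonempty, so Python's min_sub[0] is headD [].
def aStep (cycle_list : List (List Int)) (min_sub : List (List Int)) (sub : List Int) :
    List (List Int) :=
  if 0 < sub.length then
    if aHits cycle_list sub then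
      if sub.length < (min_sub.headD []).length then [sub]
      else if sub.length = (min_sub.headD []).length then min_sub ++ [sub]
      else min_sub
    else min_sub
  else min_sub

def get_minimum_node_set_all (cycle_list : List (List Int)) (node_list : List Int) :
    List (List Int) :=
  ((List.range (node_list.length + 1)).flatMap (fun r => pvCombinations node_list r)).foldl
    (aStep cycle_list) [node_list]

-- ===== PORT B =====
def bHits (cycle_sets : List (PySem.Set Int)) (sub : List Int) : Bool :=
  cycle_sets.all (fun cs => sub.any (fun x => decide (x ∈ cs)))

def get_minimum_node_set_all_alt (cycle_list : List (List Int)) (node_list : List Int) :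
    List (List Int) :=
  let node_set := PySem.Set.ofList node_list
  let cycle_sets := cycle_list.map (fun c => PySem.Set.ofList c)
  if cycle_sets.any (fun cs => (PySem.Set.inter cs node_set).isEmpty) then [node_list]
  else
    match (List.range' 1 node_list.length).findSome? (fun r =>
        let found := (pvCombinations node_list r).filter (fun sub => bHits cycle_sets sub)
        if found.isEmpty then none else some found) with
    | some found => found
    | none => [node_list]

-- ===== PRECONDITION & SPEC =====
-- D_: inputs where node_list is nonempty and hits every cycle but no nonempty proper
-- sub-list does; there A returns [node_list, node_list] (its initial state plus an
-- appended copy) while B returns [node_list] once, the intended list of minimal sets.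
def D_get_minimum_node_set_all (cycle_list : List (List Int)) (node_list : List Int) : Prop :=
  node_list ≠ [] ∧
  (∀ c ∈ cycle_list, ∃ x ∈ node_list, x ∈ c) ∧
  (∀ sub ∈ node_list.sublists, sub ≠ [] → sub.length < node_list.length →
      ∃ c ∈ cycle_list, ∀ x ∈ sub, x ∉ c)
instance (cycle_list : List (List Int)) (node_list : List Int) :
    Decidable (D_get_minimum_node_set_all cycle_list node_list) := by
  unfold D_get_minimum_node_set_all; infer_instance

def Spec_get_minimum_node_set_all (cycle_list : List (List Int)) (node_list : List Int)
    (out : List (List Int)) : Prop :=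
  ¬ D_get_minimum_node_set_all cycle_list node_list →
    out = get_minimum_node_set_all_alt cycle_list node_list
instance (cycle_list : List (List Int)) (node_list : List Int) (out : List (List Int)) :
    Decidable (Spec_get_minimum_node_set_all cycle_list node_list out) := by
  unfold Spec_get_minimum_node_set_all; infer_instance

def pvDiffWitness_get_minimum_node_set_all : List (List Int) × List Int := ([[5]], [5])
def pvDiffWitnessOut_get_minimum_node_set_all : (List (List Int)) × (List (List Int)) :=
  ([[5], [5]], [[5]])

-- ===== CLAIM (what is proved, stated in full; the proofs are below) =====
def Claim_unchanged_get_minimum_node_set_all : Prop := ∀ (cycle_list : List (List Int)) (node_list : List Int), Dom_get_minimum_node_set_all cycle_list node_list → Spec_get_minimum_node_set_all cycle_list node_list (get_minimum_node_set_all cycle_list node_list)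
def Claim_changed_get_minimum_node_set_all : Prop := Dom_get_minimum_node_set_all (pvDiffWitness_get_minimum_node_set_all.1) (pvDiffWitness_get_minimum_node_set_all.2) ∧ D_get_minimum_node_set_all (pvDiffWitness_get_minimum_node_set_all.1) (pvDiffWitness_get_minimum_node_set_all.2) ∧ get_minimum_node_set_all (pvDiffWitness_get_minimum_node_set_all.1) (pvDiffWitness_get_minimum_node_set_all.2) = pvDiffWitnessOut_get_minimum_node_set_all.1 ∧ get_minimum_node_set_all_alt (pvDiffWitness_get_minimum_node_set_all.1) (pvDiffWitness_get_minimum_node_set_all.2) = pvDiffWitnessOut_get_minimum_node_set_all.2 ∧ pvDiffWitnessOut_get_minimum_node_set_all.1 ≠ pvDiffWitnessOut_get_minimum_node_set_all.2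
def Claim_exact_get_minimum_node_set_all : Prop := ∀ (cycle_list : List (List Int)) (node_list : List Int), Dom_get_minimum_node_set_all cycle_list node_list → D_get_minimum_node_set_all cycle_list node_list → get_minimum_node_set_all cycle_list node_list ≠ get_minimum_node_set_all_alt cycle_list node_list

-- ===== LEMMAS AND PROOFS =====

theorem mem_pvCombinations {l : List Int} : ∀ {r : Nat} {sub : List Int},
    sub ∈ pvCombinations l r ↔ sub.Sublist l ∧ sub.length = r := by
  induction l with
  | nil =>
    intro r sub
    cases r with
    | zero => simp [pvCombinations, List.sublist_nil]
    | succ r =>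
      simp only [pvCombinations, List.not_mem_nil, false_iff, not_and, List.sublist_nil]
      rintro rfl; simp
  | cons x xs ih =>
    intro r sub
    cases r with
    | zero =>
      simp [pvCombinations, List.length_eq_zero_iff]
      intro h; subst h; exact List.nil_sublist _
    | succ r =>
      simp only [pvCombinations, List.mem_append, List.mem_map, ih]
      constructor
      · rintro (⟨t, ⟨hs, hl⟩, rfl⟩ | ⟨hs, hl⟩)
        · exact ⟨List.cons_sublist_cons.mpr hs, by simp [hl]⟩
        · exact ⟨hs.cons _, hl⟩
      · rintro ⟨hs, hl⟩
        rcases List.sublist_cons_iff.mp hs with h | ⟨t, rfl, ht⟩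
        · exact Or.inr ⟨h, hl⟩
        · exact Or.inl ⟨t, ⟨ht, by simpa using hl⟩, rfl⟩

theorem pvCombinations_of_gt : ∀ {l : List Int} {r : Nat}, l.length < r →
    pvCombinations l r = [] := by
  intro l
  induction l with
  | nil => intro r h; cases r with
    | zero => omega
    | succ r => rfl
  | cons x xs ih =>
    intro r h
    cases r with
    | zero => omega
    | succ r =>
      simp only [pvCombinations, List.append_eq_nil_iff, List.map_eq_nil_iff]
      constructor
      · exact ih (by simpa using h)
      · exact ih (by simp at h ⊢; omega)

theorem pvCombinations_self : ∀ {l : List Int}, pvCombinations l l.length = [l] := by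
  intro l
  induction l with
  | nil => rfl
  | cons x xs ih =>
    rw [List.length_cons, pvCombinations, ih, pvCombinations_of_gt (by omega)]
    simp

theorem bHits_eq (cl : List (List Int)) (sub : List Int) :
    bHits (cl.map (fun c => PySem.Set.ofList c)) sub = aHits cl sub := by
  simp only [bHits, aHits, List.all_map, Function.comp_def]
  congr 1; funext c; congr 1; funext x
  simp [PySem.Set.mem_ofList]

theorem aHits_iff (cl : List (List Int)) (l : List Int) :
    aHits cl l = true ↔ ∀ c ∈ cl, ∃ x ∈ l, x ∈ c := by
  simp [aHits]

theorem aStep_skip {cl : List (List Int)} {sub : List Int}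
    (h : sub = [] ∨ aHits cl sub = false) (st : List (List Int)) :
    aStep cl st sub = st := by
  rcases h with h | h
  · subst h; simp [aStep]
  · simp only [aStep, h]
    split <;> simp

theorem foldl_skip {cl : List (List Int)} :
    ∀ (L : List (List Int)), (∀ sub ∈ L, sub = [] ∨ aHits cl sub = false) →
    ∀ st, L.foldl (aStep cl) st = st := by
  intro L
  induction L with
  | nil => intro _ st; rfl
  | cons sub L ih =>
    intro h st
    rw [List.foldl_cons, aStep_skip (h sub (by simp))]
    exact ih (fun s hs => h s (by simp [hs])) st

theorem foldl_fixed {cl : List (List Int)} :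
    ∀ (L : List (List Int)) (st : List (List Int)),
    (∀ sub ∈ L, aStep cl st sub = st) → L.foldl (aStep cl) st = st := by
  intro L
  induction L with
  | nil => intro st _; rfl
  | cons sub L ih =>
    intro st h
    rw [List.foldl_cons, h sub (by simp)]
    exact ih st (fun s hs => h s (by simp [hs]))

theorem foldl_tail {cl : List (List Int)} {r : Nat} (hr : 0 < r) :
    ∀ (L : List (List Int)) (S : List (List Int)), S ≠ [] → (S.headD []).length = r →
    (∀ sub ∈ L, sub.length = r) →
    L.foldl (aStep cl) S = S ++ L.filter (fun s => aHits cl s) := by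
  intro L
  induction L with
  | nil => intro S _ _ _; simp
  | cons sub L ih =>
    intro S hS hhead hlen
    have hsub : sub.length = r := hlen sub (by simp)
    rw [List.foldl_cons]
    by_cases hh : aHits cl sub = true
    · have hstep : aStep cl S sub = S ++ [sub] := by
        simp only [aStep, hsub, hhead, hh]
        simp [hr, lt_irrefl]
      rw [hstep, ih (S ++ [sub]) (by simp) (by cases S with
          | nil => exact absurd rfl hS
          | cons a S' => simpa using hhead)
          (fun s hs => hlen s (by simp [hs]))]
      simp [List.filter_cons, hh]
    · rw [aStep_skip (Or.inr (by simpa using hh)) S,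
        ih S hS hhead (fun s hs => hlen s (by simp [hs]))]
      simp [List.filter_cons, hh]

theorem foldl_first {cl : List (List Int)} {r : Nat} {nl : List Int}
    (hr : 0 < r) (hrn : r < nl.length) :
    ∀ (L : List (List Int)), (∀ sub ∈ L, sub.length = r) →
    L.foldl (aStep cl) [nl] =
      if (L.filter (fun s => aHits cl s)).isEmpty then [nl]
      else L.filter (fun s => aHits cl s) := by
  intro L
  induction L with
  | nil => intro _; simp
  | cons sub L ih =>
    intro hlen
    have hsub : sub.length = r := hlen sub (by simp)
    rw [List.foldl_cons]
    by_cases hh : aHits cl sub = true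
    · have hstep : aStep cl [nl] sub = [sub] := by
        simp only [aStep, hsub, hh]
        simp [hr, hrn]
      rw [hstep, foldl_tail hr L [sub] (by simp) (by simpa using hsub)
        (fun s hs => hlen s (by simp [hs]))]
      simp [List.filter_cons, hh]
    · rw [aStep_skip (Or.inr (by simpa using hh)) _,
        ih (fun s hs => hlen s (by simp [hs]))]
      simp [List.filter_cons, hh]

theorem foldl_after {cl : List (List Int)} {nl : List Int} {k : Nat} {F : List (List Int)}
    (hF : F ≠ []) (hlen : ∀ e ∈ F, e.length = k) :
    ∀ (rs : List Nat), (∀ r ∈ rs, k < r) →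
    (rs.flatMap (pvCombinations nl)).foldl (aStep cl) F = F := by
  intro rs hrs
  apply foldl_fixed
  intro sub hsub
  rw [List.mem_flatMap] at hsub
  obtain ⟨r, hr, hmem⟩ := hsub
  have hslen : sub.length = r := (mem_pvCombinations.mp hmem).2
  have hk : (F.headD []).length = k := by
    cases F with
    | nil => exact absurd rfl hF
    | cons a F' => exact hlen a (by simp)
  have hkr : k < r := hrs r hr
  have h1 : ¬ (sub.length < (F.headD []).length) := by omega
  have h2 : ¬ (sub.length = (F.headD []).length) := by omega
  simp only [aStep, h1, h2]
  split <;> simp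

def gfun (cl : List (List Int)) (nl : List Int) (r : Nat) : Option (List (List Int)) :=
  let found := (pvCombinations nl r).filter (fun s => aHits cl s)
  if found.isEmpty then none else some found

theorem stepwise_none {cl : List (List Int)} {nl : List Int} :
    ∀ (rs : List Nat), rs.findSome? (gfun cl nl) = none →
    ∀ st, (rs.flatMap (pvCombinations nl)).foldl (aStep cl) st = st := by
  intro rs hnone st
  rw [List.findSome?_eq_none_iff] at hnone
  apply foldl_skip
  intro sub hsub
  rw [List.mem_flatMap] at hsub
  obtain ⟨r, hr, hmem⟩ := hsub
  have := hnone r hr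
  simp only [gfun] at this
  split at this
  · rename_i hemp
    right
    rw [List.isEmpty_iff, List.filter_eq_nil_iff] at hemp
    simpa using hemp sub hmem
  · exact absurd this (by simp)

theorem stepwise_some {cl : List (List Int)} {nl : List Int} :
    ∀ (rs : List Nat), rs.Pairwise (· < ·) → (∀ r ∈ rs, 0 < r ∧ r < nl.length) →
    ∀ F, rs.findSome? (gfun cl nl) = some F →
    (rs.flatMap (pvCombinations nl)).foldl (aStep cl) [nl] = F ∧
    ∃ k ∈ rs, F = (pvCombinations nl k).filter (fun s => aHits cl s) ∧ F ≠ [] := by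
  intro rs
  induction rs with
  | nil => intro _ _ F h; simp [List.findSome?] at h
  | cons k rs ih =>
    intro hpw hbnd F hsome
    have hk0 : 0 < k := (hbnd k (by simp)).1
    have hkn : k < nl.length := (hbnd k (by simp)).2
    rw [List.findSome?_cons] at hsome
    cases hg : gfun cl nl k with
    | some F' =>
      rw [hg] at hsome
      cases hsome
      have hFd : F = (pvCombinations nl k).filter (fun s => aHits cl s) ∧ F ≠ [] := by
        simp only [gfun] at hg
        split at hg
        · exact absurd hg (by simp)
        · rename_i hemp
          have heq := Option.some_inj.mp hg
          refine ⟨heq.symm, ?_⟩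
          rw [← heq]
          simpa [List.isEmpty_iff] using hemp
      obtain ⟨hFdef, hFne⟩ := hFd
      refine ⟨?_, k, by simp, hFdef, hFne⟩
      rw [List.flatMap_cons, List.foldl_append]
      rw [foldl_first hk0 hkn _ (fun s hs => (mem_pvCombinations.mp hs).2)]
      rw [← hFdef]
      have hIE : F.isEmpty = false := by simp [List.isEmpty_iff, hFne]
      rw [hIE]
      simp only [Bool.false_eq_true, if_false]
      apply foldl_after hFne
      · intro e he
        rw [hFdef, List.mem_filter] at he
        exact (mem_pvCombinations.mp he.1).2
      · intro r hr
        exact (List.pairwise_cons.mp hpw).1 r hr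
    | none =>
      rw [hg] at hsome
      have hrec := ih (List.pairwise_cons.mp hpw).2
        (fun r hr => hbnd r (by simp [hr])) F hsome
      refine ⟨?_, ?_⟩
      · rw [List.flatMap_cons, List.foldl_append]
        have hskip : (pvCombinations nl k).foldl (aStep cl) [nl] = [nl] := by
          apply foldl_skip
          intro sub hsub
          simp only [gfun] at hg
          split at hg
          · rename_i hemp
            right
            rw [List.isEmpty_iff, List.filter_eq_nil_iff] at hemp
            simpa using hemp sub hsub
          · exact absurd hg (by simp)
        rw [hskip]; exact hrec.1
      · obtain ⟨k', hk', h1, h2⟩ := hrec.2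
        exact ⟨k', by simp [hk'], h1, h2⟩

theorem gfun_none_iff (cl : List (List Int)) (nl : List Int) (r : Nat) :
    gfun cl nl r = none ↔ ∀ sub ∈ pvCombinations nl r, aHits cl sub = false := by
  simp [gfun, List.isEmpty_iff, List.filter_eq_nil_iff]

theorem aHits_false_iff (cl : List (List Int)) (sub : List Int) :
    aHits cl sub = false ↔ ∃ c ∈ cl, ∀ x ∈ sub, x ∉ c := by
  rw [← Bool.not_eq_true, aHits_iff]
  push_neg
  rfl

theorem pvCombinations_zero (l : List Int) : pvCombinations l 0 = [[]] := by
  cases l <;> rfl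

theorem D_iff (cl : List (List Int)) (nl : List Int) (hne : nl ≠ []) :
    D_get_minimum_node_set_all cl nl ↔ (aHits cl nl = true ∧
      ∀ r ∈ List.range' 1 (nl.length - 1), gfun cl nl r = none) := by
  have hn : 0 < nl.length := List.length_pos_iff.mpr hne
  constructor
  · rintro ⟨-, hfull, hprop⟩
    refine ⟨(aHits_iff cl nl).mpr hfull, ?_⟩
    intro r hr
    rw [List.mem_range'_1] at hr
    rw [gfun_none_iff]
    intro sub hsub
    obtain ⟨hsl, hlen⟩ := mem_pvCombinations.mp hsub
    rw [aHits_false_iff]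
    apply hprop sub (List.mem_sublists.mpr hsl)
    · intro h; subst h; simp at hlen; omega
    · omega
  · rintro ⟨hfull, hnone⟩
    refine ⟨hne, (aHits_iff cl nl).mp hfull, ?_⟩
    intro sub hsub hsne hslt
    rw [← aHits_false_iff]
    have hm : sub.length ∈ List.range' 1 (nl.length - 1) := by
      rw [List.mem_range'_1]
      have : 0 < sub.length := List.length_pos_iff.mpr hsne
      omega
    have := (gfun_none_iff cl nl sub.length).mp (hnone _ hm)
    exact this sub (mem_pvCombinations.mpr ⟨List.mem_sublists.mp hsub, rfl⟩)

-- decomposition of the index range, n = nl.length ≥ 1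
theorem range_decomp {n : Nat} (hn : 0 < n) :
    List.range (n + 1) = 0 :: (List.range' 1 (n - 1) ++ [n]) := by
  have h1 : n = (n - 1) + 1 := by omega
  have h2 : 1 + 1 * (n - 1) = n := by omega
  rw [List.range_eq_range', List.range'_succ]
  congr 1
  conv_lhs => rw [h1]
  rw [List.range'_concat, h2]


-- the feasibility guard in B: some cycle is disjoint from the node set
theorem guard_iff (cl : List (List Int)) (nl : List Int) :
    ((cl.map (fun c => PySem.Set.ofList c)).any
        (fun cs => (PySem.Set.inter cs (PySem.Set.ofList nl)).isEmpty)) = true ↔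
      ∃ c ∈ cl, ∀ x ∈ c, x ∉ nl := by
  simp [List.any_eq_true, PySem.Set.inter, List.isEmpty_iff, List.filter_eq_nil_iff,
    PySem.Set.mem_ofList, PySem.Set.contains]

theorem A_of_guard (cl : List (List Int)) (nl : List Int)
    (h : ∃ c ∈ cl, ∀ x ∈ c, x ∉ nl) :
    get_minimum_node_set_all cl nl = [nl] := by
  obtain ⟨c, hc, hdisj⟩ := h
  rw [get_minimum_node_set_all]
  apply foldl_skip
  intro sub hsub
  rw [List.mem_flatMap] at hsub
  obtain ⟨r, -, hmem⟩ := hsub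
  have hsl := (mem_pvCombinations.mp hmem).1
  right
  rw [aHits_false_iff]
  exact ⟨c, hc, fun x hx hxc => hdisj x hxc (hsl.subset hx)⟩

theorem main_nonempty (cl : List (List Int)) (nl : List Int) (hne : nl ≠ []) :
    (¬ D_get_minimum_node_set_all cl nl → get_minimum_node_set_all cl nl = get_minimum_node_set_all_alt cl nl) ∧
    (D_get_minimum_node_set_all cl nl → get_minimum_node_set_all cl nl = [nl, nl] ∧
      get_minimum_node_set_all_alt cl nl = [nl]) := by
  have hn : 0 < nl.length := List.length_pos_iff.mpr hne
  have hbnd : ∀ r ∈ List.range' 1 (nl.length - 1), 0 < r ∧ r < nl.length := by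
    intro r hr; rw [List.mem_range'_1] at hr; omega
  have hpw : (List.range' 1 (nl.length - 1)).Pairwise (· < ·) := List.pairwise_lt_range' ..
  have h0 : List.foldl (aStep cl) [nl] [[]] = [nl] := by simp [aStep]
  have hA : get_minimum_node_set_all cl nl =
      (pvCombinations nl nl.length).foldl (aStep cl)
        (((List.range' 1 (nl.length - 1)).flatMap (pvCombinations nl)).foldl
          (aStep cl) [nl]) := by
    rw [get_minimum_node_set_all, range_decomp hn, List.flatMap_cons, List.flatMap_append,
      List.foldl_append, List.foldl_append, pvCombinations_zero]
    simp only [List.flatMap_cons, List.flatMap_nil, List.append_nil, h0]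
  have hB : ((cl.map (fun c => PySem.Set.ofList c)).any
        (fun cs => (PySem.Set.inter cs (PySem.Set.ofList nl)).isEmpty)) ≠ true →
      get_minimum_node_set_all_alt cl nl =
      (match (List.range' 1 nl.length).findSome? (gfun cl nl) with
        | some F => F | none => [nl]) := by
    intro hG
    simp only [get_minimum_node_set_all_alt, bHits_eq, hG, if_false, Bool.not_eq_true]
    rfl
  have hsplit : List.range' 1 nl.length = List.range' 1 (nl.length - 1) ++ [nl.length] := by
    have h1 : nl.length = (nl.length - 1) + 1 := by omega
    have h2 : 1 + 1 * (nl.length - 1) = nl.length := by omega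
    conv_lhs => rw [h1]
    rw [List.range'_concat, h2]
  by_cases hG : ((cl.map (fun c => PySem.Set.ofList c)).any
      (fun cs => (PySem.Set.inter cs (PySem.Set.ofList nl)).isEmpty)) = true
  · -- some cycle is disjoint from the nodes: both return [nl]; D_ cannot hold
    have hdisj := (guard_iff cl nl).mp hG
    constructor
    · intro _
      rw [A_of_guard cl nl hdisj]
      simp [get_minimum_node_set_all_alt, hG]
    · intro hD
      obtain ⟨c, hc, hcd⟩ := hdisj
      obtain ⟨x, hx, hxc⟩ := hD.2.1 c hc
      exact absurd hx (hcd x hxc)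
  cases hW : (List.range' 1 (nl.length - 1)).findSome? (gfun cl nl) with
  | some F =>
    obtain ⟨hfold, k, hk, hFdef, hFne⟩ := stepwise_some _ hpw hbnd F hW
    have hkn : k < nl.length := (hbnd k hk).2
    have hlast : (pvCombinations nl nl.length).foldl (aStep cl) F = F := by
      have hflat : pvCombinations nl nl.length
          = ([nl.length] : List Nat).flatMap (pvCombinations nl) := by simp
      rw [hflat]
      refine foldl_after (k := k) hFne ?_ _ ?_
      · intro e he; rw [hFdef, List.mem_filter] at he
        exact (mem_pvCombinations.mp he.1).2
      · intro r hr; simp at hr; subst hr; exact hkn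
    constructor
    · intro _
      rw [hA, hfold, hlast, hB hG, hsplit]
      simp [List.findSome?_append, hW]
    · intro hD
      have hnone := List.findSome?_eq_none_iff.mpr ((D_iff cl nl hne).mp hD).2
      rw [hW] at hnone
      exact absurd hnone (by simp)
  | none =>
    have hfold := stepwise_none _ hW ([nl])
    have hself : pvCombinations nl nl.length = [nl] := pvCombinations_self
    by_cases hhit : aHits cl nl = true
    · have hD : D_get_minimum_node_set_all cl nl :=
        (D_iff cl nl hne).mpr ⟨hhit, List.findSome?_eq_none_iff.mp hW⟩
      constructor
      · intro hnD; exact absurd hD hnD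
      · intro _
        constructor
        · rw [hA, hfold, hself]
          simp only [List.foldl_cons, List.foldl_nil]
          simp [aStep, hhit, hn]
        · rw [hB hG, hsplit]
          have hgn : gfun cl nl nl.length = some [nl] := by
            simp [gfun, hself, List.filter_cons, hhit]
          simp [List.findSome?_append, hW, hgn]
    · have hhit' : aHits cl nl = false := by simpa using hhit
      constructor
      · intro _
        rw [hA, hfold, hself, hB hG, hsplit]
        have hgn : gfun cl nl nl.length = none := by
          simp [gfun, hself, List.filter_cons, hhit']
        simp only [List.foldl_cons, List.foldl_nil]
        rw [aStep_skip (Or.inr hhit')]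
        simp [List.findSome?_append, hW, hgn]
      · intro hD
        exact absurd ((D_iff cl nl hne).mp hD).1 (by simp [hhit'])

theorem main_nil (cl : List (List Int)) :
    get_minimum_node_set_all cl [] = [[]] ∧ get_minimum_node_set_all_alt cl [] = [[]] := by
  constructor
  · simp [get_minimum_node_set_all, List.range_succ, pvCombinations, aStep]
  · rw [get_minimum_node_set_all_alt]
    split <;> simp

-- ===== VERDICT (by name: the statements are the Claim_ definitions above) =====
theorem get_minimum_node_set_all_spec : Claim_unchanged_get_minimum_node_set_all := by
  intro cl nl _ hnD
  by_cases hne : nl = []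
  · subst hne
    rw [(main_nil cl).1, (main_nil cl).2]
  · exact (main_nonempty cl nl hne).1 hnD

theorem get_minimum_node_set_all_changed : Claim_changed_get_minimum_node_set_all := by
  unfold Claim_changed_get_minimum_node_set_all; decide

theorem get_minimum_node_set_all_tight : Claim_exact_get_minimum_node_set_all := by
  intro cl nl _ hD
  obtain ⟨h1, h2⟩ := (main_nonempty cl nl hD.1).2 hD
  rw [h1, h2]
  simp
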